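-- pv_equiv track=rewrite | github.com/ikihsan/location-companyemails | discovery/india_jobs_source.py | _is_valid_company_name
-- ===== SOURCE A (Python) =====
-- def _is_valid_company_name(name: str) -> bool:
--     """Check if a string looks like a valid company name."""
--     if not name or len(name) < 3:
--         return False
--
--     # Filter out common false positives
--     invalid = [
--         'javascript', 'python', 'java', 'react', 'angular', 'node',
--         'remote', 'full time', 'part time', 'contract', 'freelance',
--         'posted', 'days ago', 'apply', 'save job', 'company', 'employer',
--         'salary', 'location', 'job type', 'experience', 'skills',
--         'description', 'requirements', 'qualifications', 'benefits',
--         'cookie', 'privacy', 'terms', 'sign in', 'login', 'register',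
--     ]
--
--     name_lower = name.lower()
--     return not any(inv in name_lower for inv in invalid)
-- ===== SOURCE B (Python) =====
-- # First-character index: the blacklist keyed by its first letter, with the
-- # remaining tail of each keyword stored under that key.  The name is scanned
-- # once left to right; at each position the current character selects the few
-- # candidate tails, which are tested as prefixes of the rest of the string.
-- _INDEX = {
--     'j': ('avascript', 'ava', 'ob type'),
--     'p': ('ython', 'art time', 'osted', 'rivacy'),
--     'r': ('eact', 'emote', 'equirements', 'egister'),
--     'a': ('ngular', 'pply'),
--     'n': ('ode',),
--     'f': ('ull time', 'reelance'),
--     'c': ('ontract', 'ompany', 'ookie'),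
--     'd': ('ays ago', 'escription'),
--     's': ('ave job', 'alary', 'kills', 'ign in'),
--     'e': ('mployer', 'xperience'),
--     'l': ('ocation', 'ogin'),
--     'q': ('ualifications',),
--     'b': ('enefits',),
--     't': ('erms',),
-- }
--
-- def _is_valid_company_name(name: str) -> bool:
--     """Check if a string looks like a valid company name."""
--     if not name or len(name) < 3:
--         return False
--     low = name.lower()
--     for i, c in enumerate(low):
--         for tail in _INDEX.get(c, ()):
--             if low.startswith(tail, i + 1):
--                 return False
--     return True
-- ===== Notes on version B (the rewrite author's own statement) =====
-- stated objective: alternative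
-- what changed: Replaces the per-keyword whole-string containment loop with a single left-to-right scan over the lowered name driven by a precomputed first-character index (dict from first letter to keyword tails): at each position the current character selects the few candidate tails, which are tested as prefixes of the rest of the string.
import Mathlib
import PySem

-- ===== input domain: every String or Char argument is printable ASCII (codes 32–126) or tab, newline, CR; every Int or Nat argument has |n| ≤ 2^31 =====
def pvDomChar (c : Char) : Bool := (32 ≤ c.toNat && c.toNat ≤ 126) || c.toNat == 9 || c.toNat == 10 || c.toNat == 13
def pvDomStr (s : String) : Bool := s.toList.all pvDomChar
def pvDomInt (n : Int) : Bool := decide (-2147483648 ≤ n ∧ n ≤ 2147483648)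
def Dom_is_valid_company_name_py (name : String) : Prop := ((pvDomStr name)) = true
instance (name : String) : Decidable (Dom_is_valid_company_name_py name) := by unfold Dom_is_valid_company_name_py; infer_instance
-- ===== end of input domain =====

-- B replaces A's per-keyword whole-string containment loop by a single left-to-right scan
-- over the lowered name with a first-character index (dict from first letter to keyword
-- tails): at each position the current character selects the few candidate tails, tested
-- as prefixes of the rest.  Objective: alternative structure, similar cost.

-- ===== PORT A =====
-- A's blacklist, in A's order
def pvKws : List String :=
  ["javascript", "python", "java", "react", "angular", "node",
   "remote", "full time", "part time", "contract", "freelance",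
   "posted", "days ago", "apply", "save job", "company", "employer",
   "salary", "location", "job type", "experience", "skills",
   "description", "requirements", "qualifications", "benefits",
   "cookie", "privacy", "terms", "sign in", "login", "register"]

def is_valid_company_name_py (name : String) : Bool :=
  if name = "" ∨ PySem.Str.len name < 3 then false
  else
    let name_lower := PySem.Str.lower name
    !(pvKws.any (fun inv => PySem.Str.isIn inv name_lower))

-- ===== PORT B =====
-- B's module-level _INDEX dict literal: first letter → keyword tails
def pvIdx : PySem.Dict Char (List String) := ⟨[
  ('j', ["avascript", "ava", "ob type"]),
  ('p', ["ython", "art time", "osted", "rivacy"]),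
  ('r', ["eact", "emote", "equirements", "egister"]),
  ('a', ["ngular", "pply"]),
  ('n', ["ode"]),
  ('f', ["ull time", "reelance"]),
  ('c', ["ontract", "ompany", "ookie"]),
  ('d', ["ays ago", "escription"]),
  ('s', ["ave job", "alary", "kills", "ign in"]),
  ('e', ["mployer", "xperience"]),
  ('l', ["ocation", "ogin"]),
  ('q', ["ualifications"]),
  ('b', ["enefits"]),
  ('t', ["erms"])]⟩

-- the 'for i, c in enumerate(low): for tail in _INDEX.get(c, ()): if low.startswith(tail, i+1)'
-- loops, as structural recursion over the successive suffixes of low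
def pvScanB (s : List Char) : Bool :=
  match s with
  | [] => true
  | c :: t =>
    if (PySem.Dict.getD pvIdx c []).any (fun tl => PySem.Chars.startswith t tl.toList) then false
    else pvScanB t

def is_valid_company_name_py_alt (name : String) : Bool :=
  if name = "" ∨ PySem.Str.len name < 3 then false
  else pvScanB (PySem.Str.lower name).toList

-- ===== PRECONDITION & SPEC =====
def Spec_is_valid_company_name_py (name : String) (out : Bool) : Prop := out = is_valid_company_name_py_alt name
instance (name : String) (out : Bool) : Decidable (Spec_is_valid_company_name_py name out) := by unfold Spec_is_valid_company_name_py; infer_instance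

-- ===== CLAIM =====
def Claim_equal_is_valid_company_name_py : Prop := ∀ (name : String), Dom_is_valid_company_name_py name → Spec_is_valid_company_name_py name (is_valid_company_name_py name)

-- ===== LEMMAS AND PROOFS =====

-- every blacklist keyword is nonempty
theorem pvKws_nonempty : ∀ kw ∈ pvKws, kw.toList ≠ [] := by decide

-- the index lookup at c, applied as prefix tests on t, is exactly A's per-keyword
-- prefix test at the suffix c :: t
theorem pvHit_eq (c : Char) (t : List Char) :
    (PySem.Dict.getD pvIdx c []).any (fun tl => PySem.Chars.startswith t tl.toList)
      = pvKws.any (fun kw => PySem.Chars.startswith (c :: t) kw.toList) := by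
  by_cases hj : c = 'j'
  · subst hj; simp [pvIdx, pvKws, PySem.Dict.getD, PySem.Dict.get?, PySem.Chars.startswith, List.isPrefixOf]
  by_cases hp : c = 'p'
  · subst hp; simp [pvIdx, pvKws, PySem.Dict.getD, PySem.Dict.get?, PySem.Chars.startswith, List.isPrefixOf]
  by_cases hr : c = 'r'
  · subst hr; simp [pvIdx, pvKws, PySem.Dict.getD, PySem.Dict.get?, PySem.Chars.startswith, List.isPrefixOf]
  by_cases ha : c = 'a'
  · subst ha; simp [pvIdx, pvKws, PySem.Dict.getD, PySem.Dict.get?, PySem.Chars.startswith, List.isPrefixOf]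
  by_cases hn : c = 'n'
  · subst hn; simp [pvIdx, pvKws, PySem.Dict.getD, PySem.Dict.get?, PySem.Chars.startswith, List.isPrefixOf]
  by_cases hf : c = 'f'
  · subst hf; simp [pvIdx, pvKws, PySem.Dict.getD, PySem.Dict.get?, PySem.Chars.startswith, List.isPrefixOf]
  by_cases hc : c = 'c'
  · subst hc; simp [pvIdx, pvKws, PySem.Dict.getD, PySem.Dict.get?, PySem.Chars.startswith, List.isPrefixOf]
  by_cases hd : c = 'd'
  · subst hd; simp [pvIdx, pvKws, PySem.Dict.getD, PySem.Dict.get?, PySem.Chars.startswith, List.isPrefixOf]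
  by_cases hs : c = 's'
  · subst hs; simp [pvIdx, pvKws, PySem.Dict.getD, PySem.Dict.get?, PySem.Chars.startswith, List.isPrefixOf]
  by_cases he : c = 'e'
  · subst he; simp [pvIdx, pvKws, PySem.Dict.getD, PySem.Dict.get?, PySem.Chars.startswith, List.isPrefixOf]
  by_cases hl : c = 'l'
  · subst hl; simp [pvIdx, pvKws, PySem.Dict.getD, PySem.Dict.get?, PySem.Chars.startswith, List.isPrefixOf]
  by_cases hq : c = 'q'
  · subst hq; simp [pvIdx, pvKws, PySem.Dict.getD, PySem.Dict.get?, PySem.Chars.startswith, List.isPrefixOf]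
  by_cases hb : c = 'b'
  · subst hb; simp [pvIdx, pvKws, PySem.Dict.getD, PySem.Dict.get?, PySem.Chars.startswith, List.isPrefixOf]
  by_cases ht : c = 't'
  · subst ht; simp [pvIdx, pvKws, PySem.Dict.getD, PySem.Dict.get?, PySem.Chars.startswith, List.isPrefixOf]
  · simp [pvIdx, pvKws, PySem.Dict.getD, PySem.Dict.get?, PySem.Chars.startswith, List.isPrefixOf,
      Ne.symm hj, Ne.symm hp, Ne.symm hr, Ne.symm ha, Ne.symm hn, Ne.symm hf, Ne.symm hc,
      Ne.symm hd, Ne.symm hs, Ne.symm he, Ne.symm hl, Ne.symm hq, Ne.symm hb, Ne.symm ht]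

-- B's indexed scan finds a hit iff some keyword is a prefix of some suffix
theorem pvScanB_eq_false_iff (s : List Char) :
    pvScanB s = false ↔ ∃ kw ∈ pvKws, ∃ j, kw.toList <+: s.drop j := by
  induction s with
  | nil =>
    simp only [pvScanB, List.drop_nil]
    constructor
    · intro h; cases h
    · rintro ⟨kw, hkw, j, hp⟩
      exact absurd (List.prefix_nil.mp hp) (pvKws_nonempty kw hkw)
  | cons c t ih =>
    simp only [pvScanB, pvHit_eq]
    rcases hh : pvKws.any (fun kw => PySem.Chars.startswith (c :: t) kw.toList) with _ | _
    · rw [if_neg (by simp), ih]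
      constructor
      · rintro ⟨kw, hkw, j, hp⟩; exact ⟨kw, hkw, j + 1, by simpa using hp⟩
      · rintro ⟨kw, hkw, j, hp⟩
        cases j with
        | zero =>
          have hst : PySem.Chars.startswith (c :: t) kw.toList = true :=
            (PySem.Chars.startswith_iff _ _).mpr (by simpa using hp)
          have hco : pvKws.any (fun kw => PySem.Chars.startswith (c :: t) kw.toList) = true :=
            List.any_eq_true.mpr ⟨kw, hkw, hst⟩
          rw [hh] at hco; cases hco
        | succ j => exact ⟨kw, hkw, j, by simpa using hp⟩
    · rw [if_pos (by simp)]
      constructor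
      · intro _
        rcases List.any_eq_true.mp hh with ⟨kw, hkw, hst⟩
        exact ⟨kw, hkw, 0, by simpa using (PySem.Chars.startswith_iff _ _).mp hst⟩
      · intro _; rfl

-- B's scan equals A's negated containment test
theorem pvScanB_eq (s : List Char) :
    pvScanB s = !(pvKws.any (fun kw => PySem.Chars.isIn kw.toList s)) := by
  rcases hb : pvKws.any (fun kw => PySem.Chars.isIn kw.toList s) with _ | _
  · simp only [Bool.not_false]
    rcases hs : pvScanB s with _ | _
    · exfalso
      rcases (pvScanB_eq_false_iff s).mp hs with ⟨kw, hkw, j, hp⟩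
      have : PySem.Chars.isIn kw.toList s = true :=
        (PySem.Chars.exists_prefix_drop_iff_isIn _ _).mp ⟨j, hp⟩
      have hany : pvKws.any (fun kw => PySem.Chars.isIn kw.toList s) = true :=
        List.any_eq_true.mpr ⟨kw, hkw, this⟩
      rw [hany] at hb; cases hb
    · rfl
  · simp only [Bool.not_true]
    rcases List.any_eq_true.mp hb with ⟨kw, hkw, hin⟩
    rcases (PySem.Chars.exists_prefix_drop_iff_isIn kw.toList s).mpr hin with ⟨j, hp⟩
    exact (pvScanB_eq_false_iff s).mpr ⟨kw, hkw, j, hp⟩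

-- ===== VERDICT =====
theorem is_valid_company_name_py_spec : Claim_equal_is_valid_company_name_py := by
  intro name _
  unfold Spec_is_valid_company_name_py is_valid_company_name_py is_valid_company_name_py_alt
  by_cases h : name = "" ∨ PySem.Str.len name < 3
  · rw [if_pos h, if_pos h]
  · rw [if_neg h, if_neg h, pvScanB_eq]
    have hkweq : ∀ kw : String, PySem.Str.isIn kw (PySem.Str.lower name)
        = PySem.Chars.isIn kw.toList (PySem.Str.lower name).toList := by
      intro kw
      rcases hi : PySem.Chars.isIn kw.toList (PySem.Str.lower name).toList with _ | _
      · rw [Bool.eq_false_iff] at hi ⊢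
        intro hc
        exact hi ((PySem.Chars.isIn_iff_infix _ _).mpr ((PySem.Str.isIn_iff_infix _ _).mp hc))
      · exact (PySem.Str.isIn_iff_infix _ _).mpr ((PySem.Chars.isIn_iff_infix _ _).mp hi)
    simp only [hkweq]
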